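-- pv_equiv track=rewrite | github.com/kahuku/competitive_programming | leetcode/find-the-substring-with-maximum-cost.py | maximumCostSubstring
-- ===== SOURCE A (Python) =====
-- from typing import List
--
-- import string
-- import string
--
-- alphabet = list(string.ascii_lowercase)
--
-- def maximumCostSubstring(s: str, chars: str, vals: List[int]) -> int:
--     costs = [i + 1 for i in range(26)] #it would be better as a dictionary but hey it works lol
--     for i, char in enumerate(chars):
--         ind = alphabet.index(char)
--         costs[ind] = vals[i]
--
--     ans = [0]
--     m = 0
--     for i in range(len(s)):
--         ind = alphabet.index(s[i])
--         ans1 = ans[-1] + costs[ind]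
--         ans2 = costs[ind]
--         ans.append(max(ans1, ans2))
--         m = max(m, ans[-1])
--
--     return m
-- ===== SOURCE B (Python) =====
-- def maximumCostSubstring(s: str, chars: str, vals):
--     costs = list(range(1, 27))
--     for i, ch in enumerate(chars):
--         costs[ord(ch) - 97] = vals[i]
--     run = minp = best = 0
--     for ch in s:
--         run += costs[ord(ch) - 97]
--         best = max(best, run - minp)
--         minp = min(minp, run)
--     return best
-- ===== Notes on version B (the rewrite author's own statement) =====
-- stated objective: faster
-- what changed: Replaces the Kadane pass that appends best-ending-here values to a growing list (and linear alphabet.index scans) with a constant-state prefix-sum/min-prefix pass using O(1) arithmetic char indexing.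
import Mathlib
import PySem

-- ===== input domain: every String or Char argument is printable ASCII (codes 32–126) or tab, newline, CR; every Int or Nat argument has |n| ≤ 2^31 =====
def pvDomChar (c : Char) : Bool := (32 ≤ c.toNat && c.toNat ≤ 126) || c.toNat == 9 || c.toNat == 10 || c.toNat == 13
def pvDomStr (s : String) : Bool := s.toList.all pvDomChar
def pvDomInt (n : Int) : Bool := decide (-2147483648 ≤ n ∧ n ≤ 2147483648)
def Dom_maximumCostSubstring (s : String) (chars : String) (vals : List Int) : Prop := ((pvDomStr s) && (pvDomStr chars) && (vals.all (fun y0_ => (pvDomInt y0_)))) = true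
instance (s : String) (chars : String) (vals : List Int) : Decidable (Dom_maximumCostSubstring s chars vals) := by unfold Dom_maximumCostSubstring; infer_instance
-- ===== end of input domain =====

-- B replaces A's Kadane pass over a growing list (with linear alphabet.index scans) by a
-- constant-state prefix-sum / min-prefix pass with arithmetic char indexing (objective: faster, constant factor).

-- ===== PORT A =====
-- module-level: alphabet = list(string.ascii_lowercase)
def pvAlphabet : List Char :=
  ['a','b','c','d','e','f','g','h','i','j','k','l','m','n','o','p','q','r','s','t','u','v','w','x','y','z']

-- costs[ind] = vals[i]; alphabet.index / vals[i] raise outside Pre_, where .getD 0 is never used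
def pvCostsA (chars : String) (vals : List Int) : List Int :=
  (PySem.List.enumerate chars.toList).foldl
    (fun cs p =>
      let ind := (PySem.List.index? pvAlphabet p.2).getD 0
      cs.set ind ((PySem.List.pyGet? vals p.1).getD 0))
    ((List.range 26).map (fun i => (i : Int) + 1))

-- the Kadane loop: state is (ans list, m); ans[-1] via pyGet? (-1) (ans is never empty)
def pvStepA (costs : List Int) (st : List Int × Int) (c : Char) : List Int × Int :=
  let ind := (PySem.List.index? pvAlphabet c).getD 0
  let ans1 := ((PySem.List.pyGet? st.1 (-1)).getD 0) + costs.getD ind 0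
  let ans2 := costs.getD ind 0
  let ans := st.1 ++ [max ans1 ans2]
  (ans, max st.2 ((PySem.List.pyGet? ans (-1)).getD 0))

def maximumCostSubstring (s : String) (chars : String) (vals : List Int) : Int :=
  let costs := pvCostsA chars vals
  (s.toList.foldl (pvStepA costs) ([0], 0)).2

-- ===== PORT B =====
-- costs[ord(ch) - 97] = vals[i]: Python index semantics (wrap/raise) via pyIdx?/pyGet?; .getD 0 unused inside Pre_
def pvCostsB (chars : String) (vals : List Int) : List Int :=
  (PySem.List.enumerate chars.toList).foldl
    (fun cs p =>
      let ind := (PySem.List.pyIdx? cs.length ((p.2.toNat : Int) - 97)).getD 0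
      cs.set ind ((PySem.List.pyGet? vals p.1).getD 0))
    ((List.range 26).map (fun i => (i : Int) + 1))

-- state (run, minp, best); best updated before minp, as in Source B
def pvStepB (costs : List Int) (st : Int × Int × Int) (c : Char) : Int × Int × Int :=
  let run := st.1 + (PySem.List.pyGet? costs ((c.toNat : Int) - 97)).getD 0
  let best := max st.2.2 (run - st.2.1)
  let minp := min st.2.1 run
  (run, minp, best)

def maximumCostSubstring_alt (s : String) (chars : String) (vals : List Int) : Int :=
  let costs := pvCostsB chars vals
  (s.toList.foldl (pvStepB costs) (0, 0, 0)).2.2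

-- ===== PRECONDITION & SPEC =====
-- Pre_ is exactly where A returns: every char of chars and s is a lowercase letter
-- (else alphabet.index raises ValueError) and vals covers chars (else vals[i] raises IndexError).
def pvIsLower (c : Char) : Bool := 97 ≤ c.toNat && c.toNat ≤ 122
def Pre_maximumCostSubstring (s : String) (chars : String) (vals : List Int) : Prop :=
  chars.toList.all pvIsLower = true ∧ s.toList.all pvIsLower = true ∧
  chars.toList.length ≤ vals.length
instance (s : String) (chars : String) (vals : List Int) : Decidable (Pre_maximumCostSubstring s chars vals) := by
  unfold Pre_maximumCostSubstring; infer_instance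

def pvWitness_maximumCostSubstring : String × String × List Int := ("abca", "ab", [3, -2])

def Spec_maximumCostSubstring (s : String) (chars : String) (vals : List Int) (out : Int) : Prop := out = maximumCostSubstring_alt s chars vals
instance (s : String) (chars : String) (vals : List Int) (out : Int) : Decidable (Spec_maximumCostSubstring s chars vals out) := by unfold Spec_maximumCostSubstring; infer_instance

-- ===== CLAIM (what is proved, stated in full; the proofs are below) =====
def Claim_equal_maximumCostSubstring : Prop := ∀ (s : String) (chars : String) (vals : List Int), Dom_maximumCostSubstring s chars vals → Pre_maximumCostSubstring s chars vals → Spec_maximumCostSubstring s chars vals (maximumCostSubstring s chars vals)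

-- ===== LEMMAS AND PROOFS =====

-- a lowercase code point is one of the 26 alphabet letters
theorem pv_mem_alphabet (c : Char) (h : pvIsLower c = true) : c ∈ pvAlphabet := by
  have hb : 97 ≤ c.toNat ∧ c.toNat ≤ 122 := by simpa [pvIsLower] using h
  obtain ⟨h1, h2⟩ := hb
  have hc := Char.ofNat_toNat c
  interval_cases h' : c.toNat <;> exact hc ▸ (by decide)

-- the alphabet index of a lowercase letter is its code minus 97 (26 closed cases)
theorem pv_index_alphabet : ∀ c ∈ pvAlphabet, PySem.List.index? pvAlphabet c = some (c.toNat - 97) := by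
  intro c hc
  fin_cases hc <;> rfl

theorem pv_costs_fold_eq (vals : List Int) (l : List (Int × Char))
    (h : ∀ p ∈ l, pvIsLower p.2 = true) (cs : List Int) (hcs : cs.length = 26) :
    l.foldl (fun cs p =>
        let ind := (PySem.List.index? pvAlphabet p.2).getD 0
        cs.set ind ((PySem.List.pyGet? vals p.1).getD 0)) cs =
      l.foldl (fun cs p =>
        let ind := (PySem.List.pyIdx? cs.length ((p.2.toNat : Int) - 97)).getD 0
        cs.set ind ((PySem.List.pyGet? vals p.1).getD 0)) cs := by
  induction l generalizing cs with
  | nil => rfl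
  | cons p t ih =>
    have hlp := h p (List.mem_cons_self ..)
    have hb : 97 ≤ p.2.toNat ∧ p.2.toNat ≤ 122 := by simpa [pvIsLower] using hlp
    have hidx : PySem.List.pyIdx? cs.length ((p.2.toNat : Int) - 97) = some (p.2.toNat - 97) := by
      rw [hcs]
      simp only [PySem.List.pyIdx?]
      rw [if_pos (by omega), if_pos (by exact_mod_cast (by omega : (p.2.toNat : Int) - 97 < 26))]
      congr 1
      omega
    simp only [List.foldl_cons, hidx,
      pv_index_alphabet p.2 (pv_mem_alphabet p.2 hlp), Option.getD_some]
    exact ih (fun q hq => h q (List.mem_cons_of_mem _ hq)) _ (by simpa using hcs)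

theorem pv_costs_eq (chars : String) (vals : List Int)
    (h : ∀ c ∈ chars.toList, pvIsLower c = true) : pvCostsA chars vals = pvCostsB chars vals := by
  unfold pvCostsA pvCostsB
  refine pv_costs_fold_eq vals _ ?_ _ (by simp)
  intro p hp
  rcases (PySem.List.mem_enumerate_iff _ _ _).1 hp with ⟨k, hk, rfl⟩
  exact h _ (List.getElem_mem hk)

-- the core invariant: Kadane's (ans[-1], m) versus prefix-sum (run, minp, best)
theorem pv_fold_inv (costs : List Int) (l : List Char) (h : ∀ c ∈ l, pvIsLower c = true)
    (ans : List Int) (m run minp best : Int)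
    (hminp : minp = min (run - (PySem.List.pyGet? ans (-1)).getD 0) run)
    (hbest : best = m) :
    (l.foldl (pvStepA costs) (ans, m)).2 = (l.foldl (pvStepB costs) (run, minp, best)).2.2 := by
  induction l generalizing ans m run minp best with
  | nil => simpa using hbest.symm
  | cons c t ih =>
    have hlc := h c (List.mem_cons_self ..)
    have hb : 97 ≤ c.toNat ∧ c.toNat ≤ 122 := by simpa [pvIsLower] using hlc
    have hcc := pv_index_alphabet c (pv_mem_alphabet c hlc)
    have ht : ((c.toNat : Int) - 97).toNat = c.toNat - 97 := by omega
    have hget : (PySem.List.pyGet? costs ((c.toNat : Int) - 97)).getD 0 = costs.getD (c.toNat - 97) 0 := by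
      rw [PySem.List.pyGet?_of_nonneg costs (by omega), ht]
      simp [List.getD]
    simp only [List.foldl_cons]
    apply ih (fun d hd => h d (List.mem_cons_of_mem _ hd))
    · simp only [hcc, hget, Option.getD_some, PySem.List.pyGet?_neg_one_append_singleton]
      subst hminp
      omega
    · simp only [hcc, hget, Option.getD_some, PySem.List.pyGet?_neg_one_append_singleton]
      subst hminp hbest
      omega

-- ===== VERDICT (by name: the statement is the Claim_ definition above) =====
theorem maximumCostSubstring_spec : Claim_equal_maximumCostSubstring := by
  intro s chars vals _ hpre
  obtain ⟨hc, hs, _⟩ := hpre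
  show maximumCostSubstring s chars vals = maximumCostSubstring_alt s chars vals
  unfold maximumCostSubstring maximumCostSubstring_alt
  rw [pv_costs_eq chars vals (List.all_eq_true.1 hc)]
  exact pv_fold_inv (pvCostsB chars vals) s.toList (List.all_eq_true.1 hs) [0] 0 0 0 0 (by decide) rfl
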